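-- pv_equiv track=rewrite | github.com/dmytroleonenko/gym-narde | gym_narde/envs/narde.py | _validate_head_moves
-- ===== SOURCE A (Python) =====
-- def _validate_head_moves(moves, roll, first_turn, head_pos):
--     """Validate moves according to the head rule.
--
--     Args:
--         moves (list): List of moves to validate
--         roll (list): List of dice values
--         first_turn (bool): Whether it's the player's first turn
--         head_pos (int): Position of the head for the current player
--
--     Returns:
--         list: List of valid moves
--     """
--     # Head rule logic using current player's perspective
--     # According to Rule 5: Only 1 checker may leave the head per turn.
--     # With an exception on the first turn for doubles 3, 4, or 6.
--     if first_turn and sorted(roll) in [[3,3], [4,4], [6,6]]: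
--         max_head_moves = 2  # Special case for first turn with specific doubles
--     else:
--         max_head_moves = 1  # Standard case: 1 checker from head per turn
--
--     # Apply the head rule filtering
--     allowed_moves = []
--     head_moves_count = 0
--     for move in moves:
--         if move[0] == head_pos:
--             if head_moves_count < max_head_moves:
--                 allowed_moves.append(move)
--                 head_moves_count += 1
--         else:
--             allowed_moves.append(move)
--     return allowed_moves
-- ===== SOURCE B (Python) =====
-- def _validate_head_moves(moves, roll, first_turn, head_pos):
--     if first_turn and sorted(roll) in [[3, 3], [4, 4], [6, 6]]:
--         max_head_moves = 2
--     else: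
--         max_head_moves = 1
--     head_idxs = [i for i, move in enumerate(moves) if move[0] == head_pos]
--     excess = set(head_idxs[max_head_moves:])
--     return [move for i, move in enumerate(moves) if i not in excess]
-- ===== Notes on version B (the rewrite author's own statement) =====
-- stated objective: alternative
-- what changed: A's single pass with a running head-move counter is replaced by an index pass that collects the enumerate indices of head moves and slices off the excess ones past the cap, followed by a second enumerate pass keeping every move whose index is not in that excess set.
import Mathlib
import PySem

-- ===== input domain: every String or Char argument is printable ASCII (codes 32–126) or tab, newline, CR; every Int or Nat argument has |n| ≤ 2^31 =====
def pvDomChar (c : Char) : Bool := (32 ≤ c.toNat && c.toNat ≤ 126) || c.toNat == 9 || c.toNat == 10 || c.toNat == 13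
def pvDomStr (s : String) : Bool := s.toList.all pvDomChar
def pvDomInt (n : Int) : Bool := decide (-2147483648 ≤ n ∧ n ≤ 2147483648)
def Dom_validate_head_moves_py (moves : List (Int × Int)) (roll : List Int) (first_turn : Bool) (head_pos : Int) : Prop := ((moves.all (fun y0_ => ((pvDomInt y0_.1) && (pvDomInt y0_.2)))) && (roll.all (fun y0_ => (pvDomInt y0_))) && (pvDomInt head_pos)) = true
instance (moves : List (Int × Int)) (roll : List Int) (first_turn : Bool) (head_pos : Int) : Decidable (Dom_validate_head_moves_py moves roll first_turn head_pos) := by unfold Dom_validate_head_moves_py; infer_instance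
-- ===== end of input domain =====

-- B replaces A's running-counter loop by an index pass (collect head-move indices, slice off
-- the excess ones) followed by an enumerate-and-filter pass; objective: alternative.

-- ===== PORT A =====
def validate_head_moves_py (moves : List (Int × Int)) (roll : List Int) (first_turn : Bool) (head_pos : Int) : List (Int × Int) :=
  let max_head_moves : Int :=
    if first_turn && decide (PySem.List.sorted roll (fun x => x) false ∈ [[3,3],[4,4],[6,6]]) then 2 else 1
  (moves.foldl
    (fun (st : List (Int × Int) × Int) (move : Int × Int) =>
      if move.1 == head_pos then
        (if st.2 < max_head_moves then (st.1 ++ [move], st.2 + 1) else st)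
      else (st.1 ++ [move], st.2))
    ([], 0)).1

-- ===== PORT B =====
def validate_head_moves_py_alt (moves : List (Int × Int)) (roll : List Int) (first_turn : Bool) (head_pos : Int) : List (Int × Int) :=
  let max_head_moves : Int :=
    if first_turn && decide (PySem.List.sorted roll (fun x => x) false ∈ [[3,3],[4,4],[6,6]]) then 2 else 1
  let head_idxs : List Int :=
    ((PySem.List.enumerate moves 0).filter (fun p => p.2.1 == head_pos)).map (fun p => p.1)
  let excess : List Int := PySem.List.slice head_idxs (some max_head_moves) none
  (PySem.List.enumerate moves 0).filterMap
    (fun p => if excess.contains p.1 then none else some p.2)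

-- ===== PRECONDITION & SPEC =====
def Spec_validate_head_moves_py (moves : List (Int × Int)) (roll : List Int) (first_turn : Bool) (head_pos : Int) (out : List (Int × Int)) : Prop := out = validate_head_moves_py_alt moves roll first_turn head_pos
instance (moves : List (Int × Int)) (roll : List Int) (first_turn : Bool) (head_pos : Int) (out : List (Int × Int)) : Decidable (Spec_validate_head_moves_py moves roll first_turn head_pos out) := by unfold Spec_validate_head_moves_py; infer_instance

-- ===== CLAIM (what is proved, stated in full; the proofs are below) =====
def Claim_equal_validate_head_moves_py : Prop := ∀ (moves : List (Int × Int)) (roll : List Int) (first_turn : Bool) (head_pos : Int), Dom_validate_head_moves_py moves roll first_turn head_pos → Spec_validate_head_moves_py moves roll first_turn head_pos (validate_head_moves_py moves roll first_turn head_pos)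

-- ===== LEMMAS AND PROOFS =====

-- A's loop step, named so the lemmas can talk about it (defeq to the lambda in the port)
def pvStepA (head_pos k : Int) (st : List (Int × Int) × Int) (move : Int × Int) :
    List (Int × Int) × Int :=
  if move.1 == head_pos then
    (if st.2 < k then (st.1 ++ [move], st.2 + 1) else st)
  else (st.1 ++ [move], st.2)

-- reference behaviour: keep a head move while the budget b is positive
def pvGo (head_pos : Int) : List (Int × Int) → Int → List (Int × Int)
  | [], _ => []
  | m :: ms, b =>
    if m.1 == head_pos then
      (if 0 < b then m :: pvGo head_pos ms (b - 1) else pvGo head_pos ms b)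
    else m :: pvGo head_pos ms b

lemma pvFoldlA_eq (head_pos k : Int) :
    ∀ (ms : List (Int × Int)) (acc : List (Int × Int)) (c : Int),
      (ms.foldl (pvStepA head_pos k) (acc, c)).1 = acc ++ pvGo head_pos ms (k - c)
  | [], acc, c => by simp [pvGo]
  | m :: ms, acc, c => by
    rw [List.foldl_cons]
    by_cases hm : (m.1 == head_pos) = true
    · by_cases hc : c < k
      · rw [show pvStepA head_pos k (acc, c) m = (acc ++ [m], c + 1) from by
          simp [pvStepA, hm, hc]]
        rw [pvFoldlA_eq head_pos k ms (acc ++ [m]) (c + 1)]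
        simp only [pvGo]
        rw [if_pos hm, if_pos (show (0:Int) < k - c by omega)]
        have : k - (c + 1) = k - c - 1 := by ring
        rw [this, List.append_assoc]; rfl
      · rw [show pvStepA head_pos k (acc, c) m = (acc, c) from by simp [pvStepA, hm, hc]]
        rw [pvFoldlA_eq head_pos k ms acc c]
        simp only [pvGo]
        rw [if_pos hm, if_neg (show ¬ (0:Int) < k - c by omega)]
    · rw [show pvStepA head_pos k (acc, c) m = (acc ++ [m], c) from by simp [pvStepA, hm]]
      rw [pvFoldlA_eq head_pos k ms (acc ++ [m]) c]
      simp only [pvGo]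
      rw [if_neg hm, List.append_assoc]; rfl

-- the head-move indices of ms enumerated from s
def pvHs (head_pos : Int) (ms : List (Int × Int)) (s : Int) : List Int :=
  ((PySem.List.enumerate ms s).filter (fun p => p.2.1 == head_pos)).map (fun p => p.1)

lemma pvHs_cons (head_pos : Int) (m : Int × Int) (ms : List (Int × Int)) (s : Int) :
    pvHs head_pos (m :: ms) s =
      (if m.1 == head_pos then [s] else []) ++ pvHs head_pos ms (s + 1) := by
  by_cases hm : (m.1 == head_pos) = true <;>
    simp [pvHs, PySem.List.enumerate_cons, hm]

lemma pvHs_le (head_pos : Int) (ms : List (Int × Int)) (s : Int) :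
    ∀ x ∈ pvHs head_pos ms s, s ≤ x := by
  intro x hx
  simp only [pvHs, List.mem_map, List.mem_filter] at hx
  obtain ⟨p, ⟨hp, _⟩, rfl⟩ := hx
  rw [PySem.List.mem_enumerate_iff] at hp
  obtain ⟨j, hj, rfl⟩ := hp
  have : s ≤ s + (j : Int) := by omega
  simpa using this

-- B's filtering pass, the exclusion list split into a below-s prefix and the dropped suffix
lemma pvFiltB_eq (head_pos : Int) :
    ∀ (ms : List (Int × Int)) (s : Int) (k : Nat) (ex : List Int),
      (∀ x ∈ ex, x < s) →
      (PySem.List.enumerate ms s).filterMap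
        (fun p => if (ex ++ (pvHs head_pos ms s).drop k).contains p.1 then none else some p.2)
      = pvGo head_pos ms (k : Int)
  | [], s, k, ex, _ => by simp [PySem.List.enumerate_nil, pvGo]
  | m :: ms, s, k, ex, hex => by
    have htail : ∀ x ∈ (pvHs head_pos ms (s + 1)).drop k, s < x := fun x hx => by
      have := pvHs_le head_pos ms (s + 1) x (List.mem_of_mem_drop hx); omega
    rw [PySem.List.enumerate_cons, pvHs_cons]
    simp only [pvGo]
    by_cases hm : (m.1 == head_pos) = true
    · rw [if_pos hm]
      cases k with
      | zero =>
        rw [if_pos hm, if_neg (show ¬ (0:Int) < ((0:Nat):Int) by norm_num)]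
        simp only [List.drop_zero, List.singleton_append]
        refine Eq.trans (List.filterMap_cons_none (by simp)) ?_
        have hex' : ∀ x ∈ ex ++ [s], x < s + 1 := by
          intro x hx; rcases List.mem_append.1 hx with h | h
          · have := hex x h; omega
          · simp at h; omega
        have IH := pvFiltB_eq head_pos ms (s + 1) 0 (ex ++ [s]) hex'
        simp only [List.append_assoc, List.singleton_append, List.drop_zero, Nat.cast_zero] at IH ⊢
        exact IH
      | succ j =>
        rw [if_pos hm, if_pos (show (0:Int) < ((j+1:Nat):Int) by positivity)]
        have hdrop : ([s] ++ pvHs head_pos ms (s + 1)).drop (j + 1)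
            = (pvHs head_pos ms (s + 1)).drop j := by simp
        rw [hdrop]
        have htl : ∀ x ∈ (pvHs head_pos ms (s + 1)).drop j, s < x := fun x hx => by
          have := pvHs_le head_pos ms (s + 1) x (List.mem_of_mem_drop hx); omega
        have hs0 : ((ex ++ (pvHs head_pos ms (s + 1)).drop j).contains s) = false := by
          simp only [List.contains_eq_mem, decide_eq_false_iff_not, List.mem_append]
          rintro (h | h)
          · exact absurd (hex s h) (by omega)
          · exact absurd (htl s h) (by omega)
        have hfa : (if ((ex ++ (pvHs head_pos ms (s + 1)).drop j).contains s) = true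
            then (none : Option (Int × Int)) else some m) = some m := by rw [hs0]; simp
        have hcast : ((j + 1 : Nat) : Int) - 1 = (j : Int) := by push_cast; ring
        rw [hcast]
        refine Eq.trans (List.filterMap_cons_some (b := m) (by simpa using hfa)) ?_
        exact congrArg (fun l => m :: l)
          (pvFiltB_eq head_pos ms (s + 1) j ex (fun x hx => by have := hex x hx; omega))
    · rw [if_neg hm]
      rw [if_neg hm]
      simp only [List.nil_append]
      have hs0 : ((ex ++ (pvHs head_pos ms (s + 1)).drop k).contains s) = false := by
        simp only [List.contains_eq_mem, decide_eq_false_iff_not, List.mem_append]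
        rintro (h | h)
        · exact absurd (hex s h) (by omega)
        · exact absurd (htail s h) (by omega)
      have hfa : (if ((ex ++ (pvHs head_pos ms (s + 1)).drop k).contains s) = true
          then (none : Option (Int × Int)) else some m) = some m := by rw [hs0]; simp
      refine Eq.trans (List.filterMap_cons_some (b := m) (by simpa using hfa)) ?_
      exact congrArg (fun l => m :: l)
        (pvFiltB_eq head_pos ms (s + 1) k ex (fun x hx => by have := hex x hx; omega))

-- both sides reduce to pvGo with the same (positive) cap k
lemma pvBoth_eq (moves : List (Int × Int)) (head_pos : Int) (k : Nat) (hk : 0 < k) :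
    (moves.foldl (pvStepA head_pos (k : Int)) ([], 0)).1
    = (PySem.List.enumerate moves 0).filterMap
        (fun p => if (PySem.List.slice (pvHs head_pos moves 0) (some ((k : Nat) : Int)) none).contains p.1
                  then none else some p.2) := by
  rw [pvFoldlA_eq head_pos (k : Int) moves [] 0,
    PySem.List.slice_from _ (by positivity)]
  have h1 : (((k : Nat) : Int)).toNat = k := by omega
  rw [h1]
  have h2 := pvFiltB_eq head_pos moves 0 k [] (by simp)
  simp only [List.nil_append] at h2
  simp only [List.nil_append, Int.sub_zero]
  exact h2.symm

-- ===== VERDICT (by name: the statement is the Claim_ definition above) =====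
theorem validate_head_moves_py_spec : Claim_equal_validate_head_moves_py := by
  intro moves roll first_turn head_pos _
  unfold Spec_validate_head_moves_py validate_head_moves_py validate_head_moves_py_alt
  by_cases hc : (first_turn && decide (PySem.List.sorted roll (fun x => x) false ∈ [[3,3],[4,4],[6,6]])) = true
  · simp only [hc, if_true]
    have h := pvBoth_eq moves head_pos 2 (by norm_num)
    push_cast at h
    exact h
  · simp only [hc, Bool.false_eq_true, if_false]
    have h := pvBoth_eq moves head_pos 1 (by norm_num)
    push_cast at h
    exact h
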